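-- pv_equiv track=rewrite | github.com/juampamuc/ai-performance-engineering | code/labs/nvfp4_group_gemm_v2/popcorn_submission_tuned_router.py | _shape_signature_from_problem_sizes
-- ===== SOURCE A (Python) =====
-- def _shape_signature_from_problem_sizes(
--     problem_sizes: list[tuple[int, int, int, int]],
-- ) -> tuple[int, tuple[int, ...], tuple[int, ...], tuple[int, ...]]:
--     m_sig: list[int] = []
--     n_sig: list[int] = []
--     k_sig: list[int] = []
--     for m, n, k, _l in problem_sizes:
--         m_sig.append(int(m))
--         n_sig.append(int(n))
--         k_sig.append(int(k))
--     return (len(problem_sizes), tuple(m_sig), tuple(n_sig), tuple(k_sig))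
-- ===== SOURCE B (Python) =====
-- def _shape_signature_from_problem_sizes(
--     problem_sizes: list[tuple[int, int, int, int]],
-- ) -> tuple[int, tuple[int, ...], tuple[int, ...], tuple[int, ...]]:
--     def go(chunk):
--         if not chunk:
--             return (0, (), (), ())
--         if len(chunk) == 1:
--             m, n, k, _l = chunk[0]
--             return (1, (int(m),), (int(n),), (int(k),))
--         mid = len(chunk) // 2
--         c1, m1, n1, k1 = go(chunk[:mid])
--         c2, m2, n2, k2 = go(chunk[mid:])
--         return (c1 + c2, m1 + m2, n1 + n2, k1 + k2)
--     return go(problem_sizes)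
-- ===== Notes on version B (the rewrite author's own statement) =====
-- stated objective: alternative
-- what changed: Replaces A's single left-to-right loop appending to three accumulators with a divide-and-conquer recursion that halves the list, computes the three signatures of each half, and concatenates them (count summed, not len()).
import Mathlib
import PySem

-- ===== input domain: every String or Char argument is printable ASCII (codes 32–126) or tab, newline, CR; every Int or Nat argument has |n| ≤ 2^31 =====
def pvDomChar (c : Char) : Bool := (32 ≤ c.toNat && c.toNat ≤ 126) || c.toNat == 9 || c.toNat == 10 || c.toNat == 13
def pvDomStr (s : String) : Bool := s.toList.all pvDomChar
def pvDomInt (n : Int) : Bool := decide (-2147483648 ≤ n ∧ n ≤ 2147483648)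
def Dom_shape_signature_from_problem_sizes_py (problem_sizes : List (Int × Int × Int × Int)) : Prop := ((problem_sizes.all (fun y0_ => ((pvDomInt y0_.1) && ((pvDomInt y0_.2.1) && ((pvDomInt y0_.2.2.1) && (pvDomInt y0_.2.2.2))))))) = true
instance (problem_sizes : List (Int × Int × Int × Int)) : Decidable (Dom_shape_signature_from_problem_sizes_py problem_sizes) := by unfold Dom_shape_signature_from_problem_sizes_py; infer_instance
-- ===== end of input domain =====

-- B replaces A's single append loop by a divide-and-conquer recursion over list halves (objective: alternative).


-- ===== PORT A =====
-- loop: for m, n, k, _l in problem_sizes: append int(m)/int(n)/int(k) to the three accumulators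
def shape_signature_from_problem_sizes_py (problem_sizes : List (Int × Int × Int × Int)) : Int × List Int × List Int × List Int :=
  let sigs := problem_sizes.foldl
    (fun (acc : List Int × List Int × List Int) p =>
      (acc.1 ++ [p.1], acc.2.1 ++ [p.2.1], acc.2.2 ++ [p.2.2.1]))
    ([], [], [])
  ((problem_sizes.length : Int), sigs.1, sigs.2.1, sigs.2.2)

-- ===== PORT B =====
-- B's helper go: divide and conquer — split the chunk at its midpoint, recurse, concatenate
def pvGoB : List (Int × Int × Int × Int) → Int × List Int × List Int × List Int
  | [] => (0, [], [], [])
  | [p] => (1, [p.1], [p.2.1], [p.2.2.1])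
  | p :: q :: rest =>
      let chunk := p :: q :: rest
      let mid := chunk.length / 2
      let r1 := pvGoB (chunk.take mid)
      let r2 := pvGoB (chunk.drop mid)
      (r1.1 + r2.1, r1.2.1 ++ r2.2.1, r1.2.2.1 ++ r2.2.2.1, r1.2.2.2 ++ r2.2.2.2)
termination_by l => l.length
decreasing_by all_goals (simp [List.length_take, List.length_drop]; omega)

def shape_signature_from_problem_sizes_py_alt (problem_sizes : List (Int × Int × Int × Int)) : Int × List Int × List Int × List Int :=
  pvGoB problem_sizes

-- ===== PRECONDITION & SPEC =====
def Spec_shape_signature_from_problem_sizes_py (problem_sizes : List (Int × Int × Int × Int)) (out : Int × List Int × List Int × List Int) : Prop := out = shape_signature_from_problem_sizes_py_alt problem_sizes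
instance (problem_sizes : List (Int × Int × Int × Int)) (out : Int × List Int × List Int × List Int) : Decidable (Spec_shape_signature_from_problem_sizes_py problem_sizes out) := by unfold Spec_shape_signature_from_problem_sizes_py; infer_instance

-- ===== CLAIM (what is proved, stated in full; the proofs are below) =====
def Claim_equal_shape_signature_from_problem_sizes_py : Prop := ∀ (problem_sizes : List (Int × Int × Int × Int)), Dom_shape_signature_from_problem_sizes_py problem_sizes → Spec_shape_signature_from_problem_sizes_py problem_sizes (shape_signature_from_problem_sizes_py problem_sizes)

-- ===== LEMMAS AND PROOFS =====

lemma sig_foldl (l : List (Int × Int × Int × Int)) (a b c : List Int) :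
    l.foldl (fun (acc : List Int × List Int × List Int) p =>
      (acc.1 ++ [p.1], acc.2.1 ++ [p.2.1], acc.2.2 ++ [p.2.2.1])) (a, b, c)
    = (a ++ l.map (fun p => p.1), b ++ l.map (fun p => p.2.1), c ++ l.map (fun p => p.2.2.1)) := by
  induction l generalizing a b c with
  | nil => simp
  | cons h t ih => simp [List.foldl, ih]

lemma pvGoB_eq (l : List (Int × Int × Int × Int)) :
    pvGoB l = ((l.length : Int), l.map (fun p => p.1), l.map (fun p => p.2.1), l.map (fun p => p.2.2.1)) := by
  fun_induction pvGoB l with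
  | case1 => simp
  | case2 p => simp
  | case3 p q rest chunk mid r1 r2 ihT ihD =>
    simp only [r1, r2, ihT, ihD]
    refine Prod.ext ?_ (Prod.ext ?_ (Prod.ext ?_ ?_)) <;>
      simp [chunk, mid, List.take_append_drop, List.length_take, List.length_drop] <;>
      omega

-- ===== VERDICT (by name: the statement is the Claim_ definition above) =====
theorem shape_signature_from_problem_sizes_py_spec : Claim_equal_shape_signature_from_problem_sizes_py := by
  intro l _
  unfold Spec_shape_signature_from_problem_sizes_py shape_signature_from_problem_sizes_py_alt
  rw [pvGoB_eq]
  simp [shape_signature_from_problem_sizes_py, sig_foldl]
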